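-- pv_equiv track=rewrite | github.com/jakipatryk/aoc-2019 | day-10/monitoring_station.py | find_best_asteroid
-- ===== SOURCE A (Python) =====
-- def cross_product_magnitude(p, q):
--     return p[0]*q[1] - p[1]*q[0]
--
-- def subtract_vectors(p, q):
--     return (q[0]-p[0], q[1]-p[1])
--
-- def pseudo_distance(p, q):
--     return (q[0]-p[0])**2 + (q[1]-p[1])**2
--
-- def on_segment(p, q, r):
--     return (min(q[0], r[0]) <= p[0] <= max(q[0], r[0])) and (min(q[1], r[1]) <= p[1] <= max(q[1], r[1]))
--
-- def find_best_asteroid(asteroids):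
--     best_range = -1
--     best = (-1, -1)
--     for p in asteroids:
--         num_of_reachable = 0
--         for q in asteroids:
--             is_colinear_with_any = False
--             for r in asteroids:
--                 if ((p != q and q != r and p != r) and
--                     cross_product_magnitude(subtract_vectors(p, q), subtract_vectors(p, r)) == 0 and
--                         (not on_segment(p, q, r)) and
--                         (pseudo_distance(p, q) > pseudo_distance(p, r))):
--                     is_colinear_with_any = True
--                     break
--             if not is_colinear_with_any and p != q:
--                 num_of_reachable += 1
--         if num_of_reachable > best_range:
--             best_range = num_of_reachable
--             best = p
--     return (best, best_range)
-- ===== SOURCE B (Python) =====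
-- def _gcd(a, b):
--     a, b = abs(a), abs(b)
--     while b:
--         a, b = b, a % b
--     return a
--
-- def find_best_asteroid(asteroids):
--     best_range = -1
--     best = (-1, -1)
--     for p in asteroids:
--         # nearest pseudo-distance per gcd-normalized direction from p
--         nearest = {}
--         for q in asteroids:
--             if q == p:
--                 continue
--             dx, dy = q[0] - p[0], q[1] - p[1]
--             g = _gcd(dx, dy)
--             d = (dx // g, dy // g)
--             dist = dx * dx + dy * dy
--             if d not in nearest or dist < nearest[d]:
--                 nearest[d] = dist
--         count = 0
--         for q in asteroids:
--             if q == p: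
--                 continue
--             dx, dy = q[0] - p[0], q[1] - p[1]
--             g = _gcd(dx, dy)
--             if nearest[(dx // g, dy // g)] == dx * dx + dy * dy:
--                 count += 1
--         if count > best_range:
--             best_range = count
--             best = p
--     return (best, best_range)
-- ===== Notes on version B (the rewrite author's own statement) =====
-- stated objective: faster
-- what changed: Replaced the O(n^3) per-pair blocking scan (cross product + bounding box + closer test over all r) by, per asteroid, a dict mapping each gcd-normalized direction vector to the nearest pseudo-distance, so visibility is a single dict lookup.
import Mathlib
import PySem

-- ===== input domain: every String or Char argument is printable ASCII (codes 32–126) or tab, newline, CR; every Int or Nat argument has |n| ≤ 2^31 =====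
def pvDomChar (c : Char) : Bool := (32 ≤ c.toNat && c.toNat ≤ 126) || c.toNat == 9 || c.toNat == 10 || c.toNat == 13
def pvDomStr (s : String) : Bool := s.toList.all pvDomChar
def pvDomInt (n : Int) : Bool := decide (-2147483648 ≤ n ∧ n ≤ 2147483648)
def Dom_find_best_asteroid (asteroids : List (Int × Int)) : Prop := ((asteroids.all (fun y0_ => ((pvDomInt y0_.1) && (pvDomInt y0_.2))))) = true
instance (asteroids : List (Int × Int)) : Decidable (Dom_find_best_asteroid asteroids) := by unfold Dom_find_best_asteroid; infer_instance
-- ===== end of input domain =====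

-- B replaces A's cubic triple loop by, per asteroid, a dict of the nearest pseudo-distance in
-- each gcd-normalized direction (objective: faster — O(n^3) -> O(n^2) per the algorithm change).


-- ===== PORT A =====
def cross_product_magnitude (p q : Int × Int) : Int := p.1 * q.2 - p.2 * q.1

def subtract_vectors (p q : Int × Int) : Int × Int := (q.1 - p.1, q.2 - p.2)

def pseudo_distance (p q : Int × Int) : Int := (q.1 - p.1) ^ 2 + (q.2 - p.2) ^ 2

def on_segment (p q r : Int × Int) : Bool :=
  decide (min q.1 r.1 ≤ p.1 ∧ p.1 ≤ max q.1 r.1) && decide (min q.2 r.2 ≤ p.2 ∧ p.2 ≤ max q.2 r.2)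

-- the inner `for r: … break` loop of A computes exactly this flag (any over the list)
def is_colinear_with_any (asteroids : List (Int × Int)) (p q : Int × Int) : Bool :=
  asteroids.any (fun r =>
    decide (p ≠ q) && decide (q ≠ r) && decide (p ≠ r) &&
    decide (cross_product_magnitude (subtract_vectors p q) (subtract_vectors p r) = 0) &&
    !(on_segment p q r) &&
    decide (pseudo_distance p q > pseudo_distance p r))

-- body of A's middle `for q` loop (accumulator: num_of_reachable)
def reach_step (asteroids : List (Int × Int)) (p : Int × Int) (n : Int) (q : Int × Int) : Int :=
  if !(is_colinear_with_any asteroids p q) && decide (p ≠ q) then n + 1 else n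

def find_best_asteroid (asteroids : List (Int × Int)) : (Int × Int) × Int :=
  let res := asteroids.foldl (fun (acc : Int × (Int × Int)) p =>
    let num_of_reachable := asteroids.foldl (reach_step asteroids p) 0
    if num_of_reachable > acc.1 then (num_of_reachable, p) else acc) (-1, (-1, -1))
  (res.2, res.1)

-- ===== PORT B =====
-- _gcd(a, b): a, b = abs(a), abs(b); while b: a, b = b, a % b; return a
def pyGcdAux (a b : Nat) : Nat :=
  if h : b = 0 then a else pyGcdAux b (a % b)
termination_by b
decreasing_by exact Nat.mod_lt _ (Nat.pos_of_ne_zero h)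

def pyGcd (a b : Int) : Int := (pyGcdAux a.natAbs b.natAbs : Nat)

-- body of B's first `for q` loop: nearest[d] = least pseudo-distance seen so far in direction d
def nearest_step (p : Int × Int) (d : PySem.Dict (Int × Int) Int) (q : Int × Int) : PySem.Dict (Int × Int) Int :=
  if q = p then d else
    let dx := q.1 - p.1
    let dy := q.2 - p.2
    let g := pyGcd dx dy
    let k := (PySem.Int.floordiv dx g, PySem.Int.floordiv dy g)
    let dist := dx * dx + dy * dy
    match d.get? k with            -- `if d not in nearest or dist < nearest[d]: nearest[d] = dist`
    | none => d.insert k dist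
    | some m => if dist < m then d.insert k dist else d

-- body of B's second `for q` loop (accumulator: count); the key is always present in
-- `nearest` (q itself put it there), so getD's default is never consulted
def count_step (nearest : PySem.Dict (Int × Int) Int) (p : Int × Int) (n : Int) (q : Int × Int) : Int :=
  if q = p then n else
    let dx := q.1 - p.1
    let dy := q.2 - p.2
    let g := pyGcd dx dy
    if nearest.getD (PySem.Int.floordiv dx g, PySem.Int.floordiv dy g) 0 = dx * dx + dy * dy then n + 1 else n

def find_best_asteroid_alt (asteroids : List (Int × Int)) : (Int × Int) × Int :=
  let res := asteroids.foldl (fun (acc : Int × (Int × Int)) p =>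
    let nearest := asteroids.foldl (nearest_step p) PySem.Dict.empty
    let count := asteroids.foldl (count_step nearest p) 0
    if count > acc.1 then (count, p) else acc) (-1, (-1, -1))
  (res.2, res.1)

-- ===== PRECONDITION & SPEC =====
def Spec_find_best_asteroid (asteroids : List (Int × Int)) (out : (Int × Int) × Int) : Prop := out = find_best_asteroid_alt asteroids
instance (asteroids : List (Int × Int)) (out : (Int × Int) × Int) : Decidable (Spec_find_best_asteroid asteroids out) := by unfold Spec_find_best_asteroid; infer_instance

-- ===== CLAIM (what is proved, stated in full; the proofs are below) =====
def Claim_equal_find_best_asteroid : Prop := ∀ (asteroids : List (Int × Int)), Dom_find_best_asteroid asteroids → Spec_find_best_asteroid asteroids (find_best_asteroid asteroids)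

-- ===== LEMMAS AND PROOFS =====

-- abbreviations used only by the proofs: squared distance and the gcd-normalized direction key
def bdist (p q : Int × Int) : Int := (q.1 - p.1) * (q.1 - p.1) + (q.2 - p.2) * (q.2 - p.2)

def nkey (u : Int × Int) : Int × Int :=
  (PySem.Int.floordiv u.1 (pyGcd u.1 u.2), PySem.Int.floordiv u.2 (pyGcd u.1 u.2))

-- the Option-valued projection of B's dict fold onto one key
def mstep (p k : Int × Int) (acc : Option Int) (q : Int × Int) : Option Int :=
  if q ≠ p ∧ nkey (subtract_vectors p q) = k then
    some (match acc with
          | none => bdist p q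
          | some m => if bdist p q < m then bdist p q else m)
  else acc

lemma pyGcdAux_eq : ∀ (b a : Nat), pyGcdAux a b = Nat.gcd b a := by
  intro b
  induction b using Nat.strong_induction_on with
  | _ b ih =>
    intro a
    unfold pyGcdAux
    split
    · simp [*]
    · rename_i h
      rw [ih (a % b) (Nat.mod_lt _ (Nat.pos_of_ne_zero h))]
      exact (Nat.gcd_rec b a).symm

lemma pyGcd_eq (a b : Int) : pyGcd a b = (Int.gcd a b : Nat) := by
  simp [pyGcd, pyGcdAux_eq, Int.gcd, Nat.gcd_comm]

lemma sub_ne_zero_iff (p q : Int × Int) : subtract_vectors p q ≠ (0, 0) ↔ q ≠ p := by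
  simp [subtract_vectors, Prod.ext_iff]
  omega

lemma nkey_decomp (u : Int × Int) (hu : u ≠ (0, 0)) :
    ∃ g : Int, 0 < g ∧ u.1 = g * (nkey u).1 ∧ u.2 = g * (nkey u).2 ∧
      Int.gcd (nkey u).1 (nkey u).2 = 1 := by
  have hne : u.1 ≠ 0 ∨ u.2 ≠ 0 := by
    by_contra h
    push_neg at h
    exact hu (Prod.ext_iff.mpr ⟨h.1, h.2⟩)
  have hg : 0 < Int.gcd u.1 u.2 := Int.gcd_pos_iff.mpr hne
  have hgi : (0 : Int) < (Int.gcd u.1 u.2 : Nat) := by exact_mod_cast hg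
  refine ⟨(Int.gcd u.1 u.2 : Nat), hgi, ?_, ?_, ?_⟩
  · simp only [nkey, pyGcd_eq, PySem.Int.floordiv_eq_ediv_of_pos hgi]
    rw [mul_comm]
    exact (Int.ediv_mul_cancel (Int.gcd_dvd_left u.1 u.2)).symm
  · simp only [nkey, pyGcd_eq, PySem.Int.floordiv_eq_ediv_of_pos hgi]
    rw [mul_comm]
    exact (Int.ediv_mul_cancel (Int.gcd_dvd_right u.1 u.2)).symm
  · simp only [nkey, pyGcd_eq, PySem.Int.floordiv_eq_ediv_of_pos hgi]
    exact Int.gcd_div_gcd_div_gcd hg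

lemma parallel_of_coprime (d1 d2 v1 v2 : Int) (hco : Int.gcd d1 d2 = 1)
    (h : d1 * v2 = d2 * v1) : ∃ b, v1 = b * d1 ∧ v2 = b * d2 := by
  by_cases h1 : d1 = 0
  · subst h1
    have h2 : d2 = 1 ∨ d2 = -1 := by
      have := hco; simp [Int.gcd] at this
      rcases Int.natAbs_eq d2 with he | he <;> rw [he, this] <;> simp
    have hv1 : v1 = 0 := by
      rcases h2 with h2 | h2 <;> rw [h2] at h <;> omega
    rcases h2 with h2 | h2
    · exact ⟨v2, by simp [hv1], by simp [h2]⟩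
    · exact ⟨-v2, by simp [hv1], by rw [h2]; ring⟩
  · have hdvd : d1 ∣ v1 := by
      have hdd : d1 ∣ d2 * v1 := ⟨v2, by linarith [h]⟩
      have hcop : IsCoprime d1 d2 := Int.isCoprime_iff_gcd_eq_one.mpr hco
      exact hcop.dvd_of_dvd_mul_left hdd
    obtain ⟨b, hb⟩ := hdvd
    refine ⟨b, by rw [hb]; ring, ?_⟩
    have : d1 * v2 = d1 * (b * d2) := by rw [h, hb]; ring
    exact mul_left_cancel₀ h1 this

lemma nkey_smul_pos (d1 d2 b : Int) (hco : Int.gcd d1 d2 = 1) (hb : 0 < b) :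
    nkey (b * d1, b * d2) = (d1, d2) := by
  have hg : pyGcd (b * d1) (b * d2) = b := by
    rw [pyGcd_eq, Int.gcd_mul_left, hco]
    simp [Int.natAbs_of_nonneg hb.le]
  simp only [nkey, hg]
  rw [PySem.Int.floordiv_eq_ediv_of_pos hb, PySem.Int.floordiv_eq_ediv_of_pos hb]
  rw [Int.mul_ediv_cancel_left _ (by omega), Int.mul_ediv_cancel_left _ (by omega)]

lemma onseg_coord (a b c : Int) : (min a b ≤ c ∧ c ≤ max a b) ↔ (a - c) * (b - c) ≤ 0 := by
  rw [mul_nonpos_iff]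
  rcases le_total a b with hab | hab <;> simp [min_def, max_def, hab] <;> omega

lemma onseg_iff (p q r : Int × Int) :
    on_segment p q r = true ↔
      (q.1 - p.1) * (r.1 - p.1) ≤ 0 ∧ (q.2 - p.2) * (r.2 - p.2) ≤ 0 := by
  simp only [on_segment, Bool.and_eq_true, decide_eq_true_eq]
  rw [onseg_coord, onseg_coord]

lemma block_iff (p q r : Int × Int) (hq : q ≠ p) (hr : r ≠ p)
    (hd : bdist p r < bdist p q) :
    (q ≠ r ∧ cross_product_magnitude (subtract_vectors p q) (subtract_vectors p r) = 0 ∧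
      ¬ on_segment p q r = true)
    ↔ nkey (subtract_vectors p r) = nkey (subtract_vectors p q) := by
  have hu0 : subtract_vectors p q ≠ (0, 0) := (sub_ne_zero_iff p q).mpr hq
  have hv0 : subtract_vectors p r ≠ (0, 0) := (sub_ne_zero_iff p r).mpr hr
  obtain ⟨g, hgpos, hu1, hu2, hco⟩ := nkey_decomp _ hu0
  have hu1 : q.1 - p.1 = g * (nkey (subtract_vectors p q)).1 := hu1
  have hu2 : q.2 - p.2 = g * (nkey (subtract_vectors p q)).2 := hu2
  have hqr : q ≠ r := by
    intro h; rw [h] at hd; exact absurd hd (lt_irrefl _)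
  have hd0 : nkey (subtract_vectors p q) ≠ (0, 0) := by
    intro h
    apply hu0
    rw [h] at hu1 hu2
    simp at hu1 hu2
    simp [subtract_vectors, Prod.ext_iff]
    omega
  constructor
  · rintro ⟨-, hcross, hseg⟩
    have hcross' : (q.1 - p.1) * (r.2 - p.2) - (q.2 - p.2) * (r.1 - p.1) = 0 := hcross
    have hc : (nkey (subtract_vectors p q)).1 * (r.2 - p.2) =
        (nkey (subtract_vectors p q)).2 * (r.1 - p.1) := by
      have hgc : g * ((nkey (subtract_vectors p q)).1 * (r.2 - p.2)) =
          g * ((nkey (subtract_vectors p q)).2 * (r.1 - p.1)) := by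
        rw [hu1, hu2] at hcross'
        linear_combination hcross'
      exact mul_left_cancel₀ (by omega) hgc
    obtain ⟨b, hb1, hb2⟩ := parallel_of_coprime _ _ _ _ hco hc
    have hbne : b ≠ 0 := by
      intro h; rw [h] at hb1 hb2
      apply hv0
      simp at hb1 hb2
      simp [subtract_vectors, Prod.ext_iff]
      omega
    rcases lt_or_gt_of_ne hbne with hneg | hpos
    · exfalso
      apply hseg
      rw [onseg_iff]
      constructor
      · have e1 : (q.1 - p.1) * (r.1 - p.1) =
            (g * b) * ((nkey (subtract_vectors p q)).1 * (nkey (subtract_vectors p q)).1) := by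
          rw [hu1, hb1]; ring
        rw [e1]
        exact mul_nonpos_of_nonpos_of_nonneg (mul_nonpos_of_nonneg_of_nonpos hgpos.le hneg.le) (mul_self_nonneg _)
      · have e2 : (q.2 - p.2) * (r.2 - p.2) =
            (g * b) * ((nkey (subtract_vectors p q)).2 * (nkey (subtract_vectors p q)).2) := by
          rw [hu2, hb2]; ring
        rw [e2]
        exact mul_nonpos_of_nonpos_of_nonneg (mul_nonpos_of_nonneg_of_nonpos hgpos.le hneg.le) (mul_self_nonneg _)
    · have hv : subtract_vectors p r =
          (b * (nkey (subtract_vectors p q)).1, b * (nkey (subtract_vectors p q)).2) := by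
        simp [subtract_vectors, Prod.ext_iff]
        constructor
        · exact hb1
        · exact hb2
      rw [hv, nkey_smul_pos _ _ _ hco hpos]
  · intro hkey
    obtain ⟨g2, hgpos2, hv1, hv2, -⟩ := nkey_decomp _ hv0
    have hv1 : r.1 - p.1 = g2 * (nkey (subtract_vectors p q)).1 := by rw [← hkey]; exact hv1
    have hv2 : r.2 - p.2 = g2 * (nkey (subtract_vectors p q)).2 := by rw [← hkey]; exact hv2
    refine ⟨hqr, ?_, ?_⟩
    · show (q.1 - p.1) * (r.2 - p.2) - (q.2 - p.2) * (r.1 - p.1) = 0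
      rw [hu1, hu2, hv1, hv2]; ring
    · rw [onseg_iff]
      intro ⟨h1, h2⟩
      rw [hu1, hv1] at h1
      rw [hu2, hv2] at h2
      have hgg : 0 < g * g2 := mul_pos hgpos hgpos2
      have e1 : (g * (nkey (subtract_vectors p q)).1) * (g2 * (nkey (subtract_vectors p q)).1) =
          (g * g2) * ((nkey (subtract_vectors p q)).1 * (nkey (subtract_vectors p q)).1) := by ring
      have e2 : (g * (nkey (subtract_vectors p q)).2) * (g2 * (nkey (subtract_vectors p q)).2) =
          (g * g2) * ((nkey (subtract_vectors p q)).2 * (nkey (subtract_vectors p q)).2) := by ring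
      rw [e1] at h1
      rw [e2] at h2
      have hx : (nkey (subtract_vectors p q)).1 = 0 := by
        rcases mul_nonpos_iff.mp h1 with ⟨-, h⟩ | ⟨h, -⟩
        · exact mul_self_eq_zero.mp (le_antisymm h (mul_self_nonneg _))
        · linarith
      have hy : (nkey (subtract_vectors p q)).2 = 0 := by
        rcases mul_nonpos_iff.mp h2 with ⟨-, h⟩ | ⟨h, -⟩
        · exact mul_self_eq_zero.mp (le_antisymm h (mul_self_nonneg _))
        · linarith
      exact hd0 (Prod.ext_iff.mpr ⟨hx, hy⟩)

lemma nearest_step_get? (p k : Int × Int) (d : PySem.Dict (Int × Int) Int) (q : Int × Int) :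
    (nearest_step p d q).get? k = mstep p k (d.get? k) q := by
  have hns : nearest_step p d q =
      if q = p then d else
        match d.get? (nkey (subtract_vectors p q)) with
        | none => d.insert (nkey (subtract_vectors p q)) (bdist p q)
        | some m => if bdist p q < m then d.insert (nkey (subtract_vectors p q)) (bdist p q) else d := rfl
  rw [hns]
  unfold mstep
  by_cases hqp : q = p
  · simp [hqp]
  · rw [if_neg hqp]
    by_cases hk : nkey (subtract_vectors p q) = k
    · rw [if_pos ⟨hqp, hk⟩, hk]
      rcases hget : d.get? k with _ | m
      · simp [PySem.Dict.get?_insert, hget]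
      · by_cases hlt : bdist p q < m
        · simp [hlt, PySem.Dict.get?_insert]
        · simp [hlt, hget]
    · rw [if_neg (by tauto)]
      rcases hget : d.get? (nkey (subtract_vectors p q)) with _ | m
      · simp only [PySem.Dict.get?_insert]
        rw [if_neg (fun h => hk h.symm)]
      · by_cases hlt : bdist p q < m
        · simp only [hlt, if_pos, PySem.Dict.get?_insert]
          rw [if_neg (fun h => hk h.symm)]
        · simp [hlt]

lemma nearest_get? (p k : Int × Int) :
    ∀ (l : List (Int × Int)) (d : PySem.Dict (Int × Int) Int),
      (l.foldl (nearest_step p) d).get? k = l.foldl (mstep p k) (d.get? k) := by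
  intro l
  induction l with
  | nil => intro d; rfl
  | cons q t ih =>
    intro d
    rw [List.foldl_cons, List.foldl_cons, ih, nearest_step_get?]

lemma mfold_some_of_some (p k : Int × Int) :
    ∀ (l : List (Int × Int)) (x : Int), ∃ m, l.foldl (mstep p k) (some x) = some m := by
  intro l
  induction l with
  | nil => intro x; exact ⟨x, rfl⟩
  | cons q t ih =>
    intro x
    rw [List.foldl_cons]
    unfold mstep
    by_cases h : q ≠ p ∧ nkey (subtract_vectors p q) = k
    · rw [if_pos h]; exact ih _
    · rw [if_neg h]; exact ih x

lemma mfold_le (p k : Int × Int) :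
    ∀ (l : List (Int × Int)) (x m : Int), l.foldl (mstep p k) (some x) = some m → m ≤ x := by
  intro l
  induction l with
  | nil => intro x m h; simp at h; omega
  | cons q t ih =>
    intro x m h
    rw [List.foldl_cons] at h
    unfold mstep at h
    by_cases hc : q ≠ p ∧ nkey (subtract_vectors p q) = k
    · rw [if_pos hc] at h
      by_cases hlt : bdist p q < x
      · simp only [hlt, if_pos] at h
        have := ih _ _ h
        omega
      · simp only [hlt, ite_false] at h
        exact ih _ _ h
    · rw [if_neg hc] at h
      exact ih _ _ h

lemma mfold_bound (p k : Int × Int) :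
    ∀ (l : List (Int × Int)) (a : Option Int) (m : Int) (r : Int × Int),
      l.foldl (mstep p k) a = some m → r ∈ l → r ≠ p → nkey (subtract_vectors p r) = k →
      m ≤ bdist p r := by
  intro l
  induction l with
  | nil => intro a m r _ hr; simp at hr
  | cons q t ih =>
    intro a m r h hr hrp hrk
    rw [List.foldl_cons] at h
    rcases List.mem_cons.mp hr with heq | hmem
    · subst heq
      have hacc : ∃ y, mstep p k a r = some y ∧ y ≤ bdist p r := by
        unfold mstep
        rw [if_pos ⟨hrp, hrk⟩]
        rcases a with _ | m'
        · exact ⟨bdist p r, rfl, le_refl _⟩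
        · by_cases hlt : bdist p r < m'
          · exact ⟨bdist p r, by simp [hlt], le_refl _⟩
          · exact ⟨m', by simp [hlt], by omega⟩
      obtain ⟨y, hy, hyle⟩ := hacc
      rw [hy] at h
      have := mfold_le p k t y m h
      omega
    · exact ih _ _ _ h hmem hrp hrk

lemma mfold_some (p k : Int × Int) :
    ∀ (l : List (Int × Int)) (a : Option Int) (r : Int × Int),
      r ∈ l → r ≠ p → nkey (subtract_vectors p r) = k →
      ∃ m, l.foldl (mstep p k) a = some m := by
  intro l
  induction l with
  | nil => intro a r hr; simp at hr
  | cons q t ih =>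
    intro a r hr hrp hrk
    rw [List.foldl_cons]
    rcases List.mem_cons.mp hr with heq | hmem
    · subst heq
      have : ∃ y, mstep p k a r = some y := by
        unfold mstep
        rw [if_pos ⟨hrp, hrk⟩]
        rcases a with _ | m' <;> exact ⟨_, rfl⟩
      obtain ⟨y, hy⟩ := this
      rw [hy]
      exact mfold_some_of_some p k t y
    · exact ih _ _ hmem hrp hrk
lemma mfold_ach (p k : Int × Int) :
    ∀ (l : List (Int × Int)) (a : Option Int) (m : Int),
      l.foldl (mstep p k) a = some m →
      a = some m ∨ ∃ r ∈ l, r ≠ p ∧ nkey (subtract_vectors p r) = k ∧ bdist p r = m := by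
  intro l
  induction l with
  | nil => intro a m h; exact Or.inl h
  | cons q t ih =>
    intro a m h
    rw [List.foldl_cons] at h
    rcases ih _ _ h with hacc | ⟨r, hr, hrp, hrk, hrd⟩
    · unfold mstep at hacc
      by_cases hc : q ≠ p ∧ nkey (subtract_vectors p q) = k
      · rw [if_pos hc] at hacc
        rcases a with _ | m'
        · right
          refine ⟨q, List.mem_cons_self, hc.1, hc.2, ?_⟩
          simpa using hacc
        · by_cases hlt : bdist p q < m'
          · right
            refine ⟨q, List.mem_cons_self, hc.1, hc.2, ?_⟩
            simp [hlt] at hacc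
            omega
          · left
            simp [hlt] at hacc
            simp [hacc]
      · rw [if_neg hc] at hacc
        exact Or.inl hacc
    · exact Or.inr ⟨r, List.mem_cons_of_mem _ hr, hrp, hrk, hrd⟩

lemma pseudo_eq_bdist (p q : Int × Int) : pseudo_distance p q = bdist p q := by
  simp [pseudo_distance, bdist]; ring

lemma count_cond_iff (l : List (Int × Int)) (p q : Int × Int) (hq : q ∈ l) (hqp : q ≠ p) :
    ((l.foldl (nearest_step p) PySem.Dict.empty).getD (nkey (subtract_vectors p q)) 0 = bdist p q)
    ↔ ∀ r ∈ l, ¬(r ≠ p ∧ nkey (subtract_vectors p r) = nkey (subtract_vectors p q) ∧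
                  bdist p r < bdist p q) := by
  have hempty : (PySem.Dict.empty : PySem.Dict (Int × Int) Int).get? (nkey (subtract_vectors p q)) = none := rfl
  obtain ⟨m, hm⟩ := mfold_some p (nkey (subtract_vectors p q)) l none q hq hqp rfl
  have hgetD : (l.foldl (nearest_step p) PySem.Dict.empty).getD (nkey (subtract_vectors p q)) 0 = m := by
    rw [PySem.Dict.getD_eq_get?_getD, nearest_get?, hempty, hm]
    rfl
  rw [hgetD]
  constructor
  · rintro heq r hr ⟨hrp, hrk, hrd⟩
    have := mfold_bound p _ l none m r hm hr hrp hrk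
    omega
  · intro hno
    have hach := mfold_ach p _ l none m hm
    rcases hach with hcon | ⟨r, hr, hrp, hrk, hrd⟩
    · exact absurd hcon (by simp)
    · have hle := mfold_bound p _ l none m q hm hq hqp rfl
      by_contra hne
      have hlt : bdist p r < bdist p q := by omega
      exact hno r hr ⟨hrp, hrk, hlt⟩

lemma count_eq (l : List (Int × Int)) (p : Int × Int) :
    l.foldl (reach_step l p) 0 =
      l.foldl (count_step (l.foldl (nearest_step p) PySem.Dict.empty) p) 0 := by
  apply PySem.List.foldl_congr_mem
  intro n q hq
  have hcs : count_step (l.foldl (nearest_step p) PySem.Dict.empty) p n q =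
      if q = p then n else
        if (l.foldl (nearest_step p) PySem.Dict.empty).getD (nkey (subtract_vectors p q)) 0 = bdist p q
        then n + 1 else n := rfl
  rw [hcs]
  unfold reach_step
  by_cases hqp : q = p
  · rw [if_pos hqp]
    subst hqp
    simp
  · rw [if_neg hqp]
    have hpq : p ≠ q := fun h => hqp h.symm
    have hflag : is_colinear_with_any l p q = true ↔
        ∃ r ∈ l, r ≠ p ∧ nkey (subtract_vectors p r) = nkey (subtract_vectors p q) ∧
          bdist p r < bdist p q := by
      unfold is_colinear_with_any
      rw [List.any_eq_true]
      constructor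
      · rintro ⟨r, hr, hcond⟩
        simp only [Bool.and_eq_true, decide_eq_true_eq, Bool.not_eq_eq_eq_not, Bool.not_true] at hcond
        obtain ⟨⟨⟨⟨⟨-, hqr⟩, hpr⟩, hcross⟩, hseg⟩, hdist⟩ := hcond
        have hrp : r ≠ p := fun h => hpr h.symm
        have hd : bdist p r < bdist p q := by
          rw [pseudo_eq_bdist, pseudo_eq_bdist] at hdist; omega
        refine ⟨r, hr, hrp, ?_, hd⟩
        exact (block_iff p q r hqp hrp hd).mp ⟨hqr, hcross, by simp [hseg]⟩
      · rintro ⟨r, hr, hrp, hrk, hrd⟩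
        obtain ⟨hqr, hcross, hseg⟩ := (block_iff p q r hqp hrp hrd).mpr hrk
        refine ⟨r, hr, ?_⟩
        simp only [Bool.and_eq_true, decide_eq_true_eq, Bool.not_eq_eq_eq_not, Bool.not_true]
        refine ⟨⟨⟨⟨⟨hpq, hqr⟩, fun h => hrp h.symm⟩, hcross⟩, by simpa using hseg⟩, ?_⟩
        rw [pseudo_eq_bdist, pseudo_eq_bdist]; omega
    by_cases hflag' : is_colinear_with_any l p q = true
    · rw [hflag']
      have hex := hflag.mp hflag'
      have hnc : ¬ ((l.foldl (nearest_step p) PySem.Dict.empty).getD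
          (nkey (subtract_vectors p q)) 0 = bdist p q) := by
        rw [count_cond_iff l p q hq hqp]
        intro hno
        obtain ⟨r, hr, h1, h2, h3⟩ := hex
        exact hno r hr ⟨h1, h2, h3⟩
      simp [hnc]
    · have hf : is_colinear_with_any l p q = false := by
        rcases Bool.dichotomy (is_colinear_with_any l p q) with h | h
        · exact h
        · exact absurd h hflag'
      rw [hf]
      have hc : (l.foldl (nearest_step p) PySem.Dict.empty).getD
          (nkey (subtract_vectors p q)) 0 = bdist p q := by
        rw [count_cond_iff l p q hq hqp]
        intro r hr hcon
        exact hflag' (hflag.mpr ⟨r, hr, hcon.1, hcon.2.1, hcon.2.2⟩)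
      simp [hc, hpq]

-- ===== VERDICT (by name: the statement is the Claim_ definition above) =====
theorem find_best_asteroid_spec : Claim_equal_find_best_asteroid := by
  intro l _
  unfold Spec_find_best_asteroid
  unfold find_best_asteroid find_best_asteroid_alt
  have h := PySem.List.foldl_congr_mem l
    (fun (acc : Int × (Int × Int)) p =>
      let num_of_reachable := l.foldl (reach_step l p) 0
      if num_of_reachable > acc.1 then (num_of_reachable, p) else acc)
    (fun (acc : Int × (Int × Int)) p =>
      let nearest := l.foldl (nearest_step p) PySem.Dict.empty
      let count := l.foldl (count_step nearest p) 0
      if count > acc.1 then (count, p) else acc)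
    (-1, (-1, -1))
    (by
      intro acc x _
      simp only
      rw [count_eq])
  simp only [h]
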